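-- pv_equiv track=rewrite | github.com/Litlelian/LGPT | long_data_mwp/generate_part_same_feature_real_tree_data.py | remove_duplicate_list_values
-- ===== SOURCE A (Python) =====
-- def remove_duplicate_list_values(input_dict):
--     seen_values = set()
--     result_dict = {}
--     alias_dict = {}
--
--     for key, value in input_dict.items():
--         value_tuple = tuple(value[0])
--         if value_tuple not in seen_values:
--             seen_values.add(value_tuple)
--             result_dict[key] = value
--             alias_dict[key] = key
--         else:
--             for o_key, o_value in result_dict.items():
--                 if value == o_value:
--                     alias_dict[key] = o_key
--                     break
--
--     return result_dict, alias_dict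
-- ===== SOURCE B (Python) =====
-- def remove_duplicate_list_values(input_dict):
--     # Two passes: first build an index of the first (key, value) per tuple(value[0]),
--     # then assign aliases by O(1) lookup instead of rescanning result_dict.
--     firsts = {}
--     result_dict = {}
--     for key, value in input_dict.items():
--         t = tuple(value[0])
--         if t not in firsts:
--             firsts[t] = (key, value)
--             result_dict[key] = value
--     alias_dict = {}
--     for key, value in input_dict.items():
--         first_key, first_value = firsts[tuple(value[0])]
--         if value == first_value:
--             alias_dict[key] = first_key
--     return result_dict, alias_dict
-- ===== Notes on version B (the rewrite author's own statement) =====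
-- stated objective: faster
-- what changed: B replaces A's inner rescan of result_dict on every duplicate with a first-occurrence index (tuple(value[0]) -> first (key, value)) built in one pass, then assigns aliases in a second pass by O(1) dict lookup; this is valid because a full-value match in result_dict can only be the entry of the same value[0]-group.
import Mathlib
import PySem

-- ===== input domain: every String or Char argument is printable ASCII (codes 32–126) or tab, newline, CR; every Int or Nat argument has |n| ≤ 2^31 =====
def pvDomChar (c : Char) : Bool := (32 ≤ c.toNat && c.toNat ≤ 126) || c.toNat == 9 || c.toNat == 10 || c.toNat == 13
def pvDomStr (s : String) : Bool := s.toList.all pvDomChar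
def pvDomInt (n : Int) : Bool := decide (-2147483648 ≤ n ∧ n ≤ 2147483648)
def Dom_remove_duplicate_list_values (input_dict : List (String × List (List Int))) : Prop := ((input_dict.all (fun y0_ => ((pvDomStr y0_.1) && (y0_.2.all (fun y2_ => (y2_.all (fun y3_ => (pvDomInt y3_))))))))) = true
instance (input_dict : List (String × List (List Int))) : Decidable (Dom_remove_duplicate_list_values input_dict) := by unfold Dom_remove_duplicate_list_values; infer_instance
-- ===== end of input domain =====

-- B replaces A's inner rescan of result_dict with a first-occurrence index built in one pass,
-- then assigns aliases in a second pass by direct lookup (asymptotically faster).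


-- ===== PORT A =====
-- A's inner 'for o_key, o_value in result_dict.items(): if value == o_value: … break' loop
def pvFindAlias (value : List (List Int)) : List (String × List (List Int)) → Option String
  | [] => none
  | (ok, ov) :: rest => if value = ov then some ok else pvFindAlias value rest

def remove_duplicate_list_values (input_dict : List (String × List (List Int))) : (List (String × List (List Int))) × (List (String × String)) :=
  let st := input_dict.foldl
    (fun (st : PySem.Set (List Int) × PySem.Dict String (List (List Int)) × PySem.Dict String String) kv =>
      -- value_tuple = tuple(value[0]); value[0] raises IndexError on an empty value (excluded by Pre_)
      let vt := (PySem.List.pyGet? kv.2 0).getD []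
      if !(PySem.Set.contains st.1 vt) then
        (PySem.Set.add st.1 vt, st.2.1.insert kv.1 kv.2, st.2.2.insert kv.1 kv.1)
      else
        match pvFindAlias kv.2 st.2.1.items with
        | some ok => (st.1, st.2.1, st.2.2.insert kv.1 ok)
        | none => (st.1, st.2.1, st.2.2))
    (PySem.Set.empty, PySem.Dict.empty, PySem.Dict.empty)
  (st.2.1.items, st.2.2.items)

-- ===== PORT B =====
def remove_duplicate_list_values_alt (input_dict : List (String × List (List Int))) : (List (String × List (List Int))) × (List (String × String)) :=
  -- first pass: firsts[t] = first (key, value) with tuple(value[0]) == t; result_dict alongside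
  let fr := input_dict.foldl
    (fun (fr : PySem.Dict (List Int) (String × List (List Int)) × PySem.Dict String (List (List Int))) kv =>
      let t := (PySem.List.pyGet? kv.2 0).getD []
      if fr.1.contains t then fr
      else (fr.1.insert t (kv.1, kv.2), fr.2.insert kv.1 kv.2))
    (PySem.Dict.empty, PySem.Dict.empty)
  -- second pass: alias by lookup ('firsts[t]' always hits; 'none' branch is unreachable)
  let al := input_dict.foldl
    (fun (al : PySem.Dict String String) kv =>
      match fr.1.get? ((PySem.List.pyGet? kv.2 0).getD []) with
      | some fkv => if kv.2 = fkv.2 then al.insert kv.1 fkv.1 else al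
      | none => al)
    PySem.Dict.empty
  (fr.2.items, al.items)

-- ===== PRECONDITION & SPEC =====
-- Pre_ excludes inputs where some value has no first row, on which A's value[0] raises
-- IndexError, and duplicate keys, which a Python dict argument cannot carry (dict invariant).
def Pre_remove_duplicate_list_values (input_dict : List (String × List (List Int))) : Prop :=
  (∀ p ∈ input_dict, p.2 ≠ []) ∧ (input_dict.map Prod.fst).Nodup
instance (input_dict : List (String × List (List Int))) : Decidable (Pre_remove_duplicate_list_values input_dict) := by unfold Pre_remove_duplicate_list_values; infer_instance

def pvWitness_remove_duplicate_list_values : (List (String × List (List Int))) :=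
  [("a", [[1], [2]]), ("b", [[1], [2]]), ("c", [[1], [3]]), ("d", [[2]])]

def Spec_remove_duplicate_list_values (input_dict : List (String × List (List Int))) (out : (List (String × List (List Int))) × (List (String × String))) : Prop := out = remove_duplicate_list_values_alt input_dict
instance (input_dict : List (String × List (List Int))) (out : (List (String × List (List Int))) × (List (String × String))) : Decidable (Spec_remove_duplicate_list_values input_dict out) := by unfold Spec_remove_duplicate_list_values; infer_instance

-- ===== CLAIM (what is proved, stated in full; the proofs are below) =====
def Claim_equal_remove_duplicate_list_values : Prop := ∀ (input_dict : List (String × List (List Int))), Dom_remove_duplicate_list_values input_dict → Pre_remove_duplicate_list_values input_dict → Spec_remove_duplicate_list_values input_dict (remove_duplicate_list_values input_dict)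

-- ===== LEMMAS AND PROOFS =====

-- abbreviations for the ports' loop bodies (definitionally equal to the inline lambdas)
def pvHd0 (v : List (List Int)) : List Int := (PySem.List.pyGet? v 0).getD []

def pvStepA (st : PySem.Set (List Int) × PySem.Dict String (List (List Int)) × PySem.Dict String String)
    (kv : String × List (List Int)) :
    PySem.Set (List Int) × PySem.Dict String (List (List Int)) × PySem.Dict String String :=
  let vt := pvHd0 kv.2
  if !(PySem.Set.contains st.1 vt) then
    (PySem.Set.add st.1 vt, st.2.1.insert kv.1 kv.2, st.2.2.insert kv.1 kv.1)
  else
    match pvFindAlias kv.2 st.2.1.items with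
    | some ok => (st.1, st.2.1, st.2.2.insert kv.1 ok)
    | none => (st.1, st.2.1, st.2.2)

def pvStepF (fr : PySem.Dict (List Int) (String × List (List Int)) × PySem.Dict String (List (List Int)))
    (kv : String × List (List Int)) :
    PySem.Dict (List Int) (String × List (List Int)) × PySem.Dict String (List (List Int)) :=
  let t := pvHd0 kv.2
  if fr.1.contains t then fr
  else (fr.1.insert t (kv.1, kv.2), fr.2.insert kv.1 kv.2)

def pvStepAl (F : PySem.Dict (List Int) (String × List (List Int)))
    (al : PySem.Dict String String) (kv : String × List (List Int)) : PySem.Dict String String :=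
  match F.get? (pvHd0 kv.2) with
  | some fkv => if kv.2 = fkv.2 then al.insert kv.1 fkv.1 else al
  | none => al

theorem pv_A_eq_fold (l : List (String × List (List Int))) :
    remove_duplicate_list_values l =
      (((l.foldl pvStepA (PySem.Set.empty, PySem.Dict.empty, PySem.Dict.empty)).2.1).items,
       ((l.foldl pvStepA (PySem.Set.empty, PySem.Dict.empty, PySem.Dict.empty)).2.2).items) := rfl

theorem pv_B_eq_fold (l : List (String × List (List Int))) :
    remove_duplicate_list_values_alt l =
      (((l.foldl pvStepF (PySem.Dict.empty, PySem.Dict.empty)).2).items,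
       (l.foldl (pvStepAl ((l.foldl pvStepF (PySem.Dict.empty, PySem.Dict.empty)).1)) PySem.Dict.empty).items) := rfl

-- the first pass never overwrites: a binding, once present, is final
theorem pv_stepF_stable (l : List (String × List (List Int)))
    (s : PySem.Dict (List Int) (String × List (List Int)) × PySem.Dict String (List (List Int)))
    (t : List Int) (p : String × List (List Int)) (h : s.1.get? t = some p) :
    (l.foldl pvStepF s).1.get? t = some p := by
  induction l generalizing s with
  | nil => exact h
  | cons kv rest ih =>
    apply ih
    unfold pvStepF
    by_cases hc : s.1.contains (pvHd0 kv.2)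
    · simp [hc, h]
    · simp only [hc, if_false, Bool.false_eq_true]
      rw [PySem.Dict.get?_insert]
      have : t ≠ pvHd0 kv.2 := by
        intro he; rw [he] at h
        rw [PySem.Dict.contains_eq_isSome_get?, h] at hc; simp at hc
      simp [this, h]

-- A's inner scan, characterised: under the invariant it can only hit the group's first entry
theorem pv_findAlias_spec (v fv : List (List Int)) (fk : String)
    (L : List (String × List (List Int)))
    (huniq : ∀ p ∈ L, v = p.2 → p = (fk, fv)) (hmem : v = fv → (fk, fv) ∈ L) :
    pvFindAlias v L = if v = fv then some fk else none := by
  induction L with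
  | nil =>
    by_cases hv : v = fv
    · exact absurd (hmem hv) (by simp)
    · simp [pvFindAlias, hv]
  | cons q rest ih =>
    obtain ⟨ok, ov⟩ := q
    by_cases hvv : v = ov
    · have heq := huniq (ok, ov) (by simp) hvv
      have h1 : ok = fk := congrArg Prod.fst heq
      have h2 : ov = fv := congrArg Prod.snd heq
      subst h1; subst h2
      simp [pvFindAlias, hvv]
    · simp only [pvFindAlias, if_neg hvv]
      apply ih
      · exact fun p hp => huniq p (List.mem_cons_of_mem _ hp)
      · intro hv
        rcases List.mem_cons.mp (hmem hv) with h | h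
        · exact absurd (hv.trans (congrArg Prod.snd h)) hvv
        · exact h

theorem pv_invariant (l : List (String × List (List Int)))
    (seen : PySem.Set (List Int))
    (fr : PySem.Dict (List Int) (String × List (List Int)))
    (res : PySem.Dict String (List (List Int)))
    (al : PySem.Dict String String)
    (h1 : ∀ t, PySem.Set.contains seen t = fr.contains t)
    (h2 : ∀ p ∈ res.items, fr.get? (pvHd0 p.2) = some p)
    (h3 : ∀ t p, fr.get? t = some p → p ∈ res.items)
    (hfresh : ∀ p ∈ res.items, p.1 ∉ l.map Prod.fst)
    (hnodup : (l.map Prod.fst).Nodup) :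
    (l.foldl pvStepA (seen, res, al)).2.1 = (l.foldl pvStepF (fr, res)).2
    ∧ (l.foldl pvStepA (seen, res, al)).2.2 =
        l.foldl (pvStepAl ((l.foldl pvStepF (fr, res)).1)) al := by
  induction l generalizing seen fr res al with
  | nil => exact ⟨rfl, rfl⟩
  | cons kv rest ih =>
    obtain ⟨k, v⟩ := kv
    have hnd := hnodup
    simp only [List.map_cons, List.nodup_cons] at hnd
    simp only [List.foldl_cons]
    by_cases hc : fr.contains (pvHd0 v) = true
    · -- the group of value[0] has been seen: result/firsts unchanged, alias by scan vs lookup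
      have hA : PySem.Set.contains seen (pvHd0 v) = true := (h1 _).trans hc
      obtain ⟨⟨fk, fv⟩, hp⟩ : ∃ p, fr.get? (pvHd0 v) = some p := by
        rw [PySem.Dict.contains_eq_isSome_get?] at hc
        exact Option.isSome_iff_exists.mp hc
      have hFstep : pvStepF (fr, res) (k, v) = (fr, res) := by
        simp [pvStepF, hc]
      have hfind : pvFindAlias v res.items = if v = fv then some fk else none := by
        apply pv_findAlias_spec
        · intro p hpmem hvp
          have h2p := h2 p hpmem
          rw [← hvp, hp] at h2p
          exact (Option.some_inj.mp h2p).symm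
        · intro _; exact h3 _ _ hp
      have hstable : ((rest.foldl pvStepF (fr, res)).1).get? (pvHd0 v) = some (fk, fv) :=
        pv_stepF_stable rest (fr, res) _ _ hp
      have hAl : pvStepAl ((rest.foldl pvStepF (fr, res)).1) al (k, v) =
          if v = fv then al.insert k fk else al := by
        simp [pvStepAl, hstable]
      have hAmem : pvHd0 v ∈ seen := (PySem.Set.contains_iff _ _).mp hA
      have hAstep : pvStepA (seen, res, al) (k, v) =
          (seen, res, if v = fv then al.insert k fk else al) := by
        simp only [pvStepA, hA, Bool.not_true, Bool.false_eq_true, if_false, hfind]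
        by_cases hv : v = fv
        · simp [hv]
        · simp [hv]
      rw [hAstep, hFstep, hAl]
      exact ih seen fr res _ h1 h2 h3
        (fun p hpm hmem => hfresh p hpm (by simp [hmem]))
        hnd.2
    · -- a fresh group: both sides record the first (key, value) and alias key -> itself
      have hcf : fr.contains (pvHd0 v) = false := by simpa using hc
      have hA : PySem.Set.contains seen (pvHd0 v) = false := (h1 _).trans hcf
      have hnone : fr.get? (pvHd0 v) = none := by
        rw [PySem.Dict.contains_eq_isSome_get?] at hcf
        exact Option.not_isSome_iff_eq_none.mp (by simp [hcf])
      have hAnmem : pvHd0 v ∉ seen := fun hm => by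
        rw [(PySem.Set.contains_iff _ _).mpr hm] at hA; cases hA
      have hAstep : pvStepA (seen, res, al) (k, v) =
          (PySem.Set.add seen (pvHd0 v), res.insert k v, al.insert k k) := by
        simp [pvStepA, hAnmem]
      have hFstep : pvStepF (fr, res) (k, v) =
          (fr.insert (pvHd0 v) (k, v), res.insert k v) := by
        simp [pvStepF, hcf]
      have hstable : ((rest.foldl pvStepF (fr.insert (pvHd0 v) (k, v), res.insert k v)).1).get?
          (pvHd0 v) = some (k, v) :=
        pv_stepF_stable rest _ _ _ (by simp [PySem.Dict.get?_insert_self])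
      rw [hAstep, hFstep]
      have hAl : pvStepAl ((rest.foldl pvStepF (fr.insert (pvHd0 v) (k, v), res.insert k v)).1)
          al (k, v) = al.insert k k := by
        simp [pvStepAl, hstable]
      rw [hAl]
      apply ih
      · -- h1 preserved
        intro x
        rw [PySem.Dict.contains_insert]
        by_cases hx : x = pvHd0 v
        · subst hx
          have hmem : pvHd0 v ∈ seen.add (pvHd0 v) := (PySem.Set.mem_add _ _ _).mpr (Or.inr rfl)
          simp [hmem]
        · have hxb : (x == pvHd0 v) = false := by simpa using hx
          rw [hxb, Bool.false_or, ← h1]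
          cases hcs : PySem.Set.contains seen x with
          | true =>
            exact (PySem.Set.contains_iff _ _).mpr
              ((PySem.Set.mem_add _ _ _).mpr (Or.inl ((PySem.Set.contains_iff _ _).mp hcs)))
          | false =>
            cases hca : PySem.Set.contains (PySem.Set.add seen (pvHd0 v)) x with
            | false => rfl
            | true =>
              exfalso
              rcases (PySem.Set.mem_add _ _ _).mp ((PySem.Set.contains_iff _ _).mp hca) with hm | hm
              · rw [(PySem.Set.contains_iff _ _).mpr hm] at hcs; cases hcs
              · exact hx hm
      · -- h2 preserved
        intro p hpm
        rcases (PySem.Dict.mem_items_insert _ _ _ _).mp hpm with hpe | ⟨hpm', _⟩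
        · subst hpe
          exact PySem.Dict.get?_insert_self ..
        · have h2p := h2 p hpm'
          have hne : pvHd0 p.2 ≠ pvHd0 v := by
            intro he; rw [he, hnone] at h2p; exact absurd h2p (by simp)
          rw [PySem.Dict.get?_insert_of_ne _ _ hne]
          exact h2p
      · -- h3 preserved
        intro x p hg
        rw [PySem.Dict.get?_insert] at hg
        split_ifs at hg with hx
        · exact (Option.some_inj.mp hg) ▸ PySem.Dict.mem_items_insert_self ..
        · have hpm := h3 x p hg
          exact (PySem.Dict.mem_items_insert _ _ _ _).mpr
            (Or.inr ⟨hpm, fun he => hfresh p hpm (by simp [he])⟩)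
      · -- freshness preserved
        intro p hpm
        rcases (PySem.Dict.mem_items_insert _ _ _ _).mp hpm with hpe | ⟨hpm', _⟩
        · subst hpe; exact hnd.1
        · exact fun hmem => hfresh p hpm' (by simp [hmem])
      · exact hnd.2

-- ===== VERDICT (by name: the statement is the Claim_ definition above) =====
theorem remove_duplicate_list_values_spec : Claim_equal_remove_duplicate_list_values := by
  intro l _ hpre
  unfold Spec_remove_duplicate_list_values
  rw [pv_A_eq_fold, pv_B_eq_fold]
  have := pv_invariant l PySem.Set.empty PySem.Dict.empty PySem.Dict.empty PySem.Dict.empty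
    (by intro t; rfl)
    (by intro p hp; exact absurd hp (by simp [PySem.Dict.empty]))
    (by intro t p h; rw [PySem.Dict.get?_empty] at h; exact absurd h (by simp))
    (by intro p hp; exact absurd hp (by simp [PySem.Dict.empty]))
    hpre.2
  rw [this.1, this.2]
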